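-- pv_equiv track=rewrite | github.com/X75JB/Sentiment_analysis | sentiment_analysis.py | clean_tweet_text
-- ===== SOURCE A (Python) =====
-- def clean_tweet_text(tweet_text):
--     # This will take a string and remove all but english letters and spaces while making it all lower case
--     allowed = ['q', 'w', 'e', 'r', 't', 'y', 'u', 'i', 'o', 'p', 'a', 's', 'd', 'f', 'g', 'h', 'j', 'k', 'l', 'z', 'x',
--                'c', 'v', 'b', 'n', 'm', ' ']
--     final = ''
--     for letter in tweet_text.lower():
--         if letter in allowed:
--             final = final + letter
--         else:
--             continue
--     return final
-- ===== SOURCE B (Python) =====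
-- # B: lowercase once, then delete every unwanted character with a str.translate
-- # deletion table built once for the ASCII range (table-driven deletion instead
-- # of a per-character membership loop with string concatenation).
-- _DELETE = str.maketrans('', '', ''.join(
--     chr(i) for i in range(128) if not ('a' <= chr(i) <= 'z' or chr(i) == ' ')))
--
--
-- def clean_tweet_text(tweet_text):
--     return tweet_text.lower().translate(_DELETE)
-- ===== Notes on version B (the rewrite author's own statement) =====
-- stated objective: idiomatic
-- what changed: B lowercases once and deletes unwanted characters via a precomputed str.translate deletion table, replacing A's per-character membership scan of a 27-element list and quadratic string concatenation.
import Mathlib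
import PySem

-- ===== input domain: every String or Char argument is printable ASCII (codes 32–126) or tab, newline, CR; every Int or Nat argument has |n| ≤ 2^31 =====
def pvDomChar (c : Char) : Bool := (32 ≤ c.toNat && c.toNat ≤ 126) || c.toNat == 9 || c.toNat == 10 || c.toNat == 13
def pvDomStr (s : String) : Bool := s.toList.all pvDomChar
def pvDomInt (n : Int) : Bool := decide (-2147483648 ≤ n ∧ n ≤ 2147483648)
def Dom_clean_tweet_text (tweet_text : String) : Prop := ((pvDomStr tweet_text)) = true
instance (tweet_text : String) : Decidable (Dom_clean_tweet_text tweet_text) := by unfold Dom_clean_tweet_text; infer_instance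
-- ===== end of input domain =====

-- B lowercases once and deletes unwanted characters via a precomputed deletion table (str.translate); A scans a 27-element allow-list per character and concatenates.

-- ===== PORT A =====
def pvAllowed : List Char :=
  ['q', 'w', 'e', 'r', 't', 'y', 'u', 'i', 'o', 'p', 'a', 's', 'd', 'f', 'g', 'h', 'j', 'k', 'l',
   'z', 'x', 'c', 'v', 'b', 'n', 'm', ' ']

def clean_tweet_text (tweet_text : String) : String :=
  String.mk ((PySem.Str.lower tweet_text).toList.foldl
    (fun final letter => if pvAllowed.contains letter then final ++ [letter] else final) [])

-- ===== PORT B =====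
-- the str.maketrans deletion table: every ASCII codepoint that is not a-z or ' '
def pvDeleteTable : List Char :=
  (List.range 128).filterMap (fun i =>
    let c := Char.ofNat i
    if ('a' ≤ c ∧ c ≤ 'z') ∨ c = ' ' then none else some c)

def clean_tweet_text_alt (tweet_text : String) : String :=
  String.mk ((PySem.Str.lower tweet_text).toList.filter (fun c => !pvDeleteTable.contains c))

-- ===== PRECONDITION & SPEC =====
def Spec_clean_tweet_text (tweet_text : String) (out : String) : Prop := out = clean_tweet_text_alt tweet_text
instance (tweet_text : String) (out : String) : Decidable (Spec_clean_tweet_text tweet_text out) := by unfold Spec_clean_tweet_text; infer_instance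

-- ===== CLAIM (what is proved, stated in full; the proofs are below) =====
def Claim_equal_clean_tweet_text : Prop := ∀ (tweet_text : String), Dom_clean_tweet_text tweet_text → Spec_clean_tweet_text tweet_text (clean_tweet_text tweet_text)

-- ===== LEMMAS AND PROOFS =====

-- the two per-character tests agree on every ASCII codepoint
set_option maxRecDepth 4096 in
theorem pv_tables_agree : ∀ n ∈ List.range 128,
    pvAllowed.contains (Char.ofNat n) = !pvDeleteTable.contains (Char.ofNat n) := by decide

theorem pv_char_agree (c : Char) (h : c.toNat < 128) :
    pvAllowed.contains c = !pvDeleteTable.contains c := by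
  have := pv_tables_agree c.toNat (List.mem_range.mpr h)
  rwa [Char.ofNat_toNat] at this

theorem pv_lowerChar_lt (c : Char) (h : c.toNat < 128) :
    (PySem.Chars.lowerChar c).toNat < 128 := by
  unfold PySem.Chars.lowerChar
  split_ifs with hu
  · unfold PySem.Chars.isupper at hu
    simp only [Bool.and_eq_true, decide_eq_true_eq, Char.le_def, UInt32.le_iff_toNat_le] at hu
    obtain ⟨h1, h2⟩ := hu
    have hA : 65 ≤ c.toNat := h1
    have hZ : c.toNat ≤ 90 := h2
    have hv : (c.toNat + 32).isValidChar := Or.inl (by omega)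
    simp only [Char.toNat_ofNat, if_pos hv]
    omega
  · exact h

theorem clean_tweet_text_spec : Claim_equal_clean_tweet_text := by
  intro s hdom
  unfold Spec_clean_tweet_text clean_tweet_text clean_tweet_text_alt
  rw [PySem.List.foldl_append_if_eq_filter]
  simp only [List.nil_append]
  congr 1
  apply List.filter_congr
  intro c hc
  have hlt : c.toNat < 128 := by
    rw [PySem.Str.toList_lower, PySem.Chars.lower] at hc
    obtain ⟨d, hd, rfl⟩ := List.mem_map.mp hc
    have hdc : pvDomChar d = true := by
      unfold Dom_clean_tweet_text pvDomStr at hdom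
      exact List.all_eq_true.mp hdom d hd
    unfold pvDomChar at hdc
    simp only [Bool.or_eq_true, Bool.and_eq_true, decide_eq_true_eq, beq_iff_eq] at hdc
    apply pv_lowerChar_lt
    omega
  exact pv_char_agree c hlt
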